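-- pv_equiv track=rewrite | github.com/Siecje/htmd | tests/utils.py | _replace_key_in_section
-- ===== SOURCE A (Python) =====
-- def _replace_key_in_section(
--     lines: list[str],
--     section: str,
--     field: str,
--     new_line: str,
-- ) -> tuple[list[str], bool, bool]:
--     out: list[str] = []
--     replaced = False
--     section_found = False
--     current: str | None = None
--     for line in lines:
--         stripped = line.strip()
--         if stripped.startswith('[') and stripped.endswith(']'):
--             current = stripped[1:-1].strip()
--             if current == section:
--                 section_found = True
--         if current == section and line.lstrip().startswith(f'{field} ='):
--             out.append(new_line if new_line.endswith('\n') else new_line + '\n')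
--             replaced = True
--             continue
--         out.append(line)
--     return out, replaced, section_found
-- ===== SOURCE B (Python) =====
-- def _replace_key_in_section(
--     lines: list[str],
--     section: str,
--     field: str,
--     new_line: str,
-- ) -> tuple[list[str], bool, bool]:
--     # Pass 1: label every line with the section name in effect for it.
--     labels: list[str | None] = []
--     cur: str | None = None
--     for line in lines:
--         s = line.strip()
--         if s.startswith('[') and s.endswith(']'):
--             cur = s[1:-1].strip()
--         labels.append(cur)
--     section_found = section in labels
--     nl = new_line if new_line.endswith('\n') else new_line + '\n'
--     # Pass 2: emit, replacing matching field lines inside the section.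
--     out: list[str] = []
--     replaced = False
--     for line, label in zip(lines, labels):
--         if label == section and line.lstrip().startswith(field + ' ='):
--             out.append(nl)
--             replaced = True
--         else:
--             out.append(line)
--     return out, replaced, section_found
-- ===== Notes on version B (the rewrite author's own statement) =====
-- stated objective: alternative
-- what changed: Single stateful loop (out/replaced/section_found/current all mutated together) replaced by a two-pass decomposition: first label each line with its effective section, then emit replacements from zip(lines, labels), with section_found computed as a membership test on the labels.
import Mathlib
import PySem

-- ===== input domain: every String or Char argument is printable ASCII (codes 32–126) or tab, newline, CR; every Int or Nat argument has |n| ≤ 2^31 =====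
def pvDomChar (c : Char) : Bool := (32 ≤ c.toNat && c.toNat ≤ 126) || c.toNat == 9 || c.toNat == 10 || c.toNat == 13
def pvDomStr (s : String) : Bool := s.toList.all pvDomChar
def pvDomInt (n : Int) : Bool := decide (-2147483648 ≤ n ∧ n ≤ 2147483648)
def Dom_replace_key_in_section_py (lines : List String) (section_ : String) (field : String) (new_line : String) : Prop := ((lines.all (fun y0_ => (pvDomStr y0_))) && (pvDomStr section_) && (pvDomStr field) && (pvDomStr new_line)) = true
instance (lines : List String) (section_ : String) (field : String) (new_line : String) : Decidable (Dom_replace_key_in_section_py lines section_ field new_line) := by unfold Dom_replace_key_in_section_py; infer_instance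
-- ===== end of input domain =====

-- B replaces A's single four-variable stateful loop by a two-pass decomposition
-- (label each line with its effective section, then emit from the zipped pairs);
-- same cost, alternative structure.

-- ===== PORT A =====
def replace_key_in_section_py (lines : List String) (section_ : String) (field : String) (new_line : String) : List String × Bool × Bool :=
  let st := lines.foldl (fun (st : List String × Bool × Bool × Option String) line =>
    let out := st.1
    let replaced := st.2.1
    let section_found := st.2.2.1
    let current := st.2.2.2
    let stripped := PySem.Str.strip line
    let hdr := PySem.Str.startswith stripped "[" && PySem.Str.endswith stripped "]"
    let current := if hdr then some (PySem.Str.strip (PySem.Str.slice stripped (some 1) (some (-1)))) else current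
    let section_found := if hdr && current == some section_ then true else section_found
    if current == some section_ && PySem.Str.startswith (PySem.Str.lstrip line) (field ++ " =") then
      (out ++ [if PySem.Str.endswith new_line "\n" then new_line else new_line ++ "\n"], true, section_found, current)
    else
      (out ++ [line], replaced, section_found, current)
  ) ([], false, false, none)
  (st.1, st.2.1, st.2.2.1)

-- ===== PORT B =====
def replace_key_in_section_py_alt (lines : List String) (section_ : String) (field : String) (new_line : String) : List String × Bool × Bool :=
  -- pass 1: labels
  let lc := lines.foldl (fun (st : List (Option String) × Option String) line =>
    let s := PySem.Str.strip line
    let cur := if PySem.Str.startswith s "[" && PySem.Str.endswith s "]"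
               then some (PySem.Str.strip (PySem.Str.slice s (some 1) (some (-1)))) else st.2
    (st.1 ++ [cur], cur)) ([], none)
  let section_found := lc.1.contains (some section_)
  let nl := if PySem.Str.endswith new_line "\n" then new_line else new_line ++ "\n"
  -- pass 2: emit from zip
  let orp := (lines.zip lc.1).foldl (fun (st : List String × Bool) p =>
    if p.2 == some section_ && PySem.Str.startswith (PySem.Str.lstrip p.1) (field ++ " =") then
      (st.1 ++ [nl], true)
    else
      (st.1 ++ [p.1], st.2)) ([], false)
  (orp.1, orp.2, section_found)

-- ===== PRECONDITION & SPEC =====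
def Spec_replace_key_in_section_py (lines : List String) (section_ : String) (field : String) (new_line : String) (out : List String × Bool × Bool) : Prop := out = replace_key_in_section_py_alt lines section_ field new_line
instance (lines : List String) (section_ : String) (field : String) (new_line : String) (out : List String × Bool × Bool) : Decidable (Spec_replace_key_in_section_py lines section_ field new_line out) := by unfold Spec_replace_key_in_section_py; infer_instance

-- ===== CLAIM (what is proved, stated in full; the proofs are below) =====
def Claim_equal_replace_key_in_section_py : Prop := ∀ (lines : List String) (section_ : String) (field : String) (new_line : String), Dom_replace_key_in_section_py lines section_ field new_line → Spec_replace_key_in_section_py lines section_ field new_line (replace_key_in_section_py lines section_ field new_line)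

-- ===== LEMMAS AND PROOFS =====

/-- The section label in effect after seeing `line`, starting from `cur`. -/
def pvStep (line : String) (cur : Option String) : Option String :=
  let s := PySem.Str.strip line
  if PySem.Str.startswith s "[" && PySem.Str.endswith s "]"
  then some (PySem.Str.strip (PySem.Str.slice s (some 1) (some (-1)))) else cur

/-- `line` is a header line. -/
def pvHdr (line : String) : Bool :=
  PySem.Str.startswith (PySem.Str.strip line) "[" && PySem.Str.endswith (PySem.Str.strip line) "]"

/-- Per-line effective section labels. -/
def pvLabels (cur : Option String) : List String → List (Option String)
  | [] => []
  | l :: ls => pvStep l cur :: pvLabels (pvStep l cur) ls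

/-- Final label state. -/
def pvFinal (cur : Option String) : List String → Option String
  | [] => cur
  | l :: ls => pvFinal (pvStep l cur) ls

def pvNl (new_line : String) : String :=
  if PySem.Str.endswith new_line "\n" then new_line else new_line ++ "\n"

def pvCond (section_ field : String) (p : String × Option String) : Bool :=
  p.2 == some section_ && PySem.Str.startswith (PySem.Str.lstrip p.1) (field ++ " =")

/-- A's loop body, named. -/
def pvAStep (section_ field new_line : String) (st : List String × Bool × Bool × Option String)
    (line : String) : List String × Bool × Bool × Option String :=
  let c := pvStep line st.2.2.2
  let f := if pvHdr line && (c == some section_) then true else st.2.2.1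
  if pvCond section_ field (line, c) then (st.1 ++ [pvNl new_line], true, f, c)
  else (st.1 ++ [line], st.2.1, f, c)

theorem pvLabels_fold (lines : List String) (acc : List (Option String)) (cur : Option String) :
    lines.foldl (fun (st : List (Option String) × Option String) line =>
      (st.1 ++ [pvStep line st.2], pvStep line st.2)) (acc, cur)
    = (acc ++ pvLabels cur lines, pvFinal cur lines) := by
  induction lines generalizing acc cur with
  | nil => simp [pvLabels, pvFinal]
  | cons l ls ih =>
    simp only [List.foldl_cons, pvLabels, pvFinal, ih]
    simp

theorem pvEmit_fold (section_ field : String) (nl : String) (pairs : List (String × Option String))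
    (acc : List String) (rep : Bool) :
    pairs.foldl (fun (st : List String × Bool) p =>
      if pvCond section_ field p then (st.1 ++ [nl], true) else (st.1 ++ [p.1], st.2)) (acc, rep)
    = (acc ++ pairs.map (fun p => if pvCond section_ field p then nl else p.1),
       rep || pairs.any (pvCond section_ field)) := by
  induction pairs generalizing acc rep with
  | nil => simp
  | cons p ps ih =>
    simp only [List.foldl_cons, List.map_cons, List.any_cons]
    by_cases h : pvCond section_ field p = true
    · simp [h, ih]
    · simp [h, ih]

theorem pvStep_of_not_hdr (l : String) (cur : Option String) (hh : ¬ pvHdr l = true) :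
    pvStep l cur = cur := by
  simp only [pvHdr, Bool.not_eq_true] at hh
  simp only [pvStep]
  rw [hh]
  simp

theorem pvMain (section_ field new_line : String) (lines : List String)
    (out : List String) (rep found : Bool) (cur : Option String)
    (hinv : cur = some section_ → found = true) :
    lines.foldl (pvAStep section_ field new_line) (out, rep, found, cur)
    = (out ++ ((lines.zip (pvLabels cur lines)).map
         (fun p => if pvCond section_ field p then pvNl new_line else p.1)),
       rep || (lines.zip (pvLabels cur lines)).any (pvCond section_ field),
       found || (pvLabels cur lines).contains (some section_),
       pvFinal cur lines) := by
  induction lines generalizing out rep found cur with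
  | nil => simp [pvLabels, pvFinal]
  | cons l ls ih =>
    have hinv' : pvStep l cur = some section_ →
        (if pvHdr l && (pvStep l cur == some section_) then true else found) = true := by
      intro hcs
      by_cases hh : pvHdr l = true
      · simp [hh, hcs]
      · rw [pvStep_of_not_hdr l cur hh] at hcs
        simp [hinv hcs]
    have hfound : ∀ rest : Bool,
        ((if pvHdr l && (pvStep l cur == some section_) then true else found) || rest)
        = (found || ((some section_ == pvStep l cur) || rest)) := by
      intro rest
      by_cases hcs : (pvStep l cur == some section_) = true
      · have hcs' : (some section_ == pvStep l cur) = true := by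
          simp only [beq_iff_eq] at hcs ⊢; exact hcs.symm
        by_cases hh : pvHdr l = true
        · simp [hh, hcs, hcs']
        · rw [pvStep_of_not_hdr l cur hh] at hcs
          simp [hinv (beq_iff_eq.mp hcs), hcs', hh]
      · have hcs1 : (pvStep l cur == some section_) = false := by simpa using hcs
        have hcs' : (some section_ == pvStep l cur) = false := by
          simp only [beq_eq_false_iff_ne, ne_eq] at hcs1 ⊢
          exact fun h => hcs1 h.symm
        simp [hcs1, hcs']
    by_cases hr : pvCond section_ field (l, pvStep l cur) = true
    · have hstep : pvAStep section_ field new_line (out, rep, found, cur) l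
          = (out ++ [pvNl new_line], true,
             (if pvHdr l && (pvStep l cur == some section_) then true else found), pvStep l cur) := by
        simp [pvAStep, hr]
      simp only [List.foldl_cons, hstep, ih _ _ _ _ hinv', pvLabels, pvFinal,
        List.zip_cons_cons, List.map_cons, List.any_cons, List.contains_cons]
      rw [hfound]
      simp [hr]
    · have hstep : pvAStep section_ field new_line (out, rep, found, cur) l
          = (out ++ [l], rep,
             (if pvHdr l && (pvStep l cur == some section_) then true else found), pvStep l cur) := by
        simp [pvAStep, hr]
      simp only [List.foldl_cons, hstep, ih _ _ _ _ hinv', pvLabels, pvFinal,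
        List.zip_cons_cons, List.map_cons, List.any_cons, List.contains_cons]
      rw [hfound]
      simp [hr]

-- ===== VERDICT (by name: the statement is the Claim_ definition above) =====
theorem replace_key_in_section_py_spec : Claim_equal_replace_key_in_section_py := by
  intro lines section_ field new_line _
  show replace_key_in_section_py lines section_ field new_line
      = replace_key_in_section_py_alt lines section_ field new_line
  simp only [replace_key_in_section_py, replace_key_in_section_py_alt]
  rw [show (fun (st : List String × Bool × Bool × Option String) line =>
        let o := st.1
        let replaced := st.2.1
        let section_found := st.2.2.1
        let current := st.2.2.2
        let stripped := PySem.Str.strip line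
        let hdr := PySem.Str.startswith stripped "[" && PySem.Str.endswith stripped "]"
        let current := if hdr then some (PySem.Str.strip (PySem.Str.slice stripped (some 1) (some (-1)))) else current
        let section_found := if hdr && current == some section_ then true else section_found
        if current == some section_ && PySem.Str.startswith (PySem.Str.lstrip line) (field ++ " =") then
          (o ++ [if PySem.Str.endswith new_line "\n" then new_line else new_line ++ "\n"], true, section_found, current)
        else
          (o ++ [line], replaced, section_found, current))
      = pvAStep section_ field new_line from by
    funext st line
    simp [pvAStep, pvStep, pvHdr, pvCond, pvNl]]
  rw [show (fun (st : List (Option String) × Option String) line =>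
        let s := PySem.Str.strip line
        let cur := if PySem.Str.startswith s "[" && PySem.Str.endswith s "]"
                   then some (PySem.Str.strip (PySem.Str.slice s (some 1) (some (-1)))) else st.2
        (st.1 ++ [cur], cur))
      = (fun (st : List (Option String) × Option String) line =>
          (st.1 ++ [pvStep line st.2], pvStep line st.2)) from by
    funext st line
    simp [pvStep]]
  rw [show (fun (st : List String × Bool) (p : String × Option String) =>
        if p.2 == some section_ && PySem.Str.startswith (PySem.Str.lstrip p.1) (field ++ " =") then
          (st.1 ++ [if PySem.Str.endswith new_line "\n" then new_line else new_line ++ "\n"], true)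
        else
          (st.1 ++ [p.1], st.2))
      = (fun (st : List String × Bool) p =>
          if pvCond section_ field p then (st.1 ++ [pvNl new_line], true) else (st.1 ++ [p.1], st.2)) from by
    funext st p
    simp [pvCond, pvNl]]
  rw [pvLabels_fold lines [] none,
      pvMain section_ field new_line lines [] false false none (by simp)]
  simp only [List.nil_append]
  rw [pvEmit_fold section_ field (pvNl new_line) (lines.zip (pvLabels none lines)) [] false]
  simp
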